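-- pv_equiv track=rewrite | github.com/juheon/LRCAGE | script/filter_spurious.v4.py | Convert2chunk_byblank
-- ===== SOURCE A (Python) =====
-- def Convert2chunk_byblank(a_stralign):
-- 	if a_stralign=="empty":
-- 		return [];
--
-- 	if len(a_stralign)==0:
-- 		return [];
--
-- 	arrExon=[]      #list of arrBase
-- 	arrPrevBase=[]
-- 	nPrevMode=nCurMode=-1   #0: empty, 1: match, 2: -
-- 	for i in a_stralign:
-- 		if i==" ":
-- 			nCurMode=0;
-- 		else:
-- 			nCurMode=1;
-- 		if nPrevMode!=nCurMode and nPrevMode>=0: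
-- 			arrExon.append( arrPrevBase )
-- 			arrPrevBase=[];
-- 		arrPrevBase.append( i )
-- 		nPrevMode=nCurMode
-- 	arrExon.append( arrPrevBase )
-- 	return arrExon;
-- ===== SOURCE B (Python) =====
-- def Convert2chunk_byblank(a_stralign):
--     # B: two-pointer run slicing instead of A's mode-tracking accumulator (alternative, same cost)
--     if a_stralign == "empty":
--         return []
--     if len(a_stralign) == 0:
--         return []
--     s = a_stralign
--     n = len(s)
--     out = []
--     i = 0
--     while i < n:
--         j = i + 1
--         while j < n and (s[j] == " ") == (s[i] == " "):
--             j += 1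
--         out.append(list(s[i:j]))
--         i = j
--     return out
-- ===== Notes on version B (the rewrite author's own statement) =====
-- stated objective: alternative
-- what changed: B finds each run by advancing a second index over same-class characters and slicing it out, instead of A's per-character fold that tracks a previous-mode flag and flushes a pending accumulator on class changes.
import Mathlib
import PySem

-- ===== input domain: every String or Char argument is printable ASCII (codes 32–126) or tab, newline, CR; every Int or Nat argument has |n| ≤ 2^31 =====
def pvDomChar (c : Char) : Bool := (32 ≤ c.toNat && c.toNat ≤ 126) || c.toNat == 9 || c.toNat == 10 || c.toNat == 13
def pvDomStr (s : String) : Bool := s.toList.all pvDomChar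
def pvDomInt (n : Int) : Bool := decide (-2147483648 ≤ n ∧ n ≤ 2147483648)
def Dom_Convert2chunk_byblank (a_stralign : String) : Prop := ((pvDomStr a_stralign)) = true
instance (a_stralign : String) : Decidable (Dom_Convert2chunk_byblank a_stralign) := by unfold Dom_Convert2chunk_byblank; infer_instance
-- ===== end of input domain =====

-- B replaces A's per-character mode-tracking fold by a two-pointer run extraction (alternative structure, same cost).

-- ===== PORT A =====
-- loop body of A's for-loop: state = (arrExon, arrPrevBase, nPrevMode)
def pvAStep (st : List (List String) × List String × Int) (i : Char) :
    List (List String) × List String × Int :=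
  let nCurMode : Int := if i = ' ' then 0 else 1
  if st.2.2 ≠ nCurMode ∧ 0 ≤ st.2.2 then
    (st.1 ++ [st.2.1], [String.ofList [i]], nCurMode)
  else
    (st.1, st.2.1 ++ [String.ofList [i]], nCurMode)

def Convert2chunk_byblank (a_stralign : String) : List (List String) :=
  if a_stralign = "empty" then []
  else if PySem.Str.len a_stralign = 0 then []
  else
    let fin := a_stralign.toList.foldl pvAStep ([], [], -1)
    fin.1 ++ [fin.2.1]

-- ===== PORT B =====
-- B's outer while loop: take the first character's run (the inner j-advance = takeWhile
-- over same-class characters, the slice s[i:j] = that run), then continue after it.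
def pvBLoop : List Char → List (List String)
  | [] => []
  | c :: rest =>
    ((c :: rest.takeWhile (fun d => (d == ' ') == (c == ' '))).map (fun ch => String.ofList [ch]))
      :: pvBLoop (rest.dropWhile (fun d => (d == ' ') == (c == ' ')))
termination_by l => l.length
decreasing_by
  simpa using Nat.lt_succ_of_le (List.length_dropWhile_le _ _)

def Convert2chunk_byblank_alt (a_stralign : String) : List (List String) :=
  if a_stralign = "empty" then []
  else if PySem.Str.len a_stralign = 0 then []
  else pvBLoop a_stralign.toList

-- ===== PRECONDITION & SPEC =====
def Spec_Convert2chunk_byblank (a_stralign : String) (out : List (List String)) : Prop := out = Convert2chunk_byblank_alt a_stralign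
instance (a_stralign : String) (out : List (List String)) : Decidable (Spec_Convert2chunk_byblank a_stralign out) := by unfold Spec_Convert2chunk_byblank; infer_instance

-- ===== CLAIM (what is proved, stated in full; the proofs are below) =====
def Claim_equal_Convert2chunk_byblank : Prop := ∀ (a_stralign : String), Dom_Convert2chunk_byblank a_stralign → Spec_Convert2chunk_byblank a_stralign (Convert2chunk_byblank a_stralign)

-- ===== LEMMAS AND PROOFS =====

lemma pvBLoop_cons (c : Char) (rest : List Char) :
    pvBLoop (c :: rest)
      = ((c :: rest.takeWhile (fun d => (d == ' ') == (c == ' '))).map (fun ch => String.ofList [ch]))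
          :: pvBLoop (rest.dropWhile (fun d => (d == ' ') == (c == ' '))) := by
  rw [pvBLoop.eq_def]

-- invariant of A's fold: with previous class b (true = space) and pending run prev,
-- finishing the fold produces exon, then prev extended by the same-class prefix, then B's loop on the rest
lemma pvFoldA (l : List Char) (exon : List (List String)) (prev : List String) (b : Bool) :
    (let fin := l.foldl pvAStep (exon, prev, (if b then (0 : Int) else 1));
      fin.1 ++ [fin.2.1])
    = exon ++ ([prev ++ (l.takeWhile (fun d => (d == ' ') == b)).map (fun ch => String.ofList [ch])]
        ++ pvBLoop (l.dropWhile (fun d => (d == ' ') == b))) := by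
  induction l generalizing exon prev b with
  | nil => simp [pvBLoop]
  | cons c rest ih =>
    by_cases hc : (c == ' ') = b
    · have hstep : pvAStep (exon, prev, (if b then (0 : Int) else 1)) c
          = (exon, prev ++ [String.ofList [c]], (if b then (0 : Int) else 1)) := by
        cases b <;> simp_all [pvAStep, beq_iff_eq]
      simp only [List.foldl_cons, hstep, ih, List.takeWhile_cons, List.dropWhile_cons, hc]
      simp
    · have hstep : pvAStep (exon, prev, (if b then (0 : Int) else 1)) c
          = (exon ++ [prev], [String.ofList [c]], (if (c == ' ') then (0 : Int) else 1)) := by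
        cases b <;> cases hcc : (c == ' ') <;> simp_all [pvAStep, beq_iff_eq]
      have ih' := ih (exon ++ [prev]) [String.ofList [c]] (c == ' ')
      have hcb : ((c == ' ') == b) = false := by
        cases hcc : (c == ' ') <;> cases b <;> simp_all
      simp only [List.foldl_cons, hstep, ih', List.takeWhile_cons, List.dropWhile_cons, hcb,
        Bool.false_eq_true, if_false]
      rw [pvBLoop_cons]
      simp

-- ===== VERDICT (by name: the statement is the Claim_ definition above) =====
theorem Convert2chunk_byblank_spec : Claim_equal_Convert2chunk_byblank := by
  intro s _
  unfold Spec_Convert2chunk_byblank Convert2chunk_byblank Convert2chunk_byblank_alt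
  by_cases he : s = "empty"
  · simp [he]
  · by_cases hz : PySem.Str.len s = 0
    · have hz' : s = "" := by simpa using hz
      subst hz'
      simp
    · simp only [he, hz, if_false]
      have hne : s.toList ≠ [] := by
        intro h
        apply hz
        simp [PySem.Str.len_eq, h]
      obtain ⟨c, rest, hcr⟩ := List.exists_cons_of_ne_nil hne
      have hfirst : pvAStep ([], [], (-1 : Int)) c
          = ([], [String.ofList [c]], (if (c == ' ') then (0 : Int) else 1)) := by
        cases hcc : (c == ' ') <;> simp_all [pvAStep, beq_iff_eq]
      have := pvFoldA rest [] [String.ofList [c]] (c == ' ')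
      simp only [hcr, List.foldl_cons, hfirst, this]
      rw [pvBLoop_cons]
      simp
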